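-- pv_equiv track=rewrite | github.com/Kamend1/SoftUni-Courses | softuni_python_advanced/week_8_workshops/tic_tac_toe_game.py | explore_if_three_connected
-- ===== SOURCE A (Python) =====
-- import copy
--
-- directions = {
--     'up': (-1, 0),
--     'left': (0, -1),
--     'upleft': (-1, -1),
--     'upright': (-1, 1)
-- }
--
-- def search_direction(matrix, row_idx, col_idx, player_idx, direction):
--     current_matrix = copy.deepcopy(matrix)
--     result = 0
--
--     if row_idx < 0 or col_idx < 0 or row_idx >= len(current_matrix) or col_idx >= len(current_matrix[0]):
--         return 0
--     if current_matrix[row_idx][col_idx] != player_idx: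
--         return 0
--
--     current_matrix[row_idx][col_idx] = 'v'
--     result += 1
--     if result == 3:
--         return result
--
--     coords = directions[direction]
--
--     result += search_direction(current_matrix, row_idx + coords[0], col_idx + coords[1], player_idx, direction)
--     result += search_direction(current_matrix, row_idx - coords[0], col_idx - coords[1], player_idx, direction)
--
--     return result
--
-- def explore_if_three_connected(matrix, row_idx, column_idx, player_idx):
--     player_won = False
--     max_score = 0
--     for direction in directions.keys():
--         max_score = 0
--         current_result = search_direction(matrix, row_idx, column_idx, player_idx, direction)
--         if current_result > max_score:
--             max_score = current_result
--         if max_score >= 3: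
--             player_won = True
--
--     return player_won
-- ===== SOURCE B (Python) =====
-- def explore_if_three_connected(matrix, row_idx, column_idx, player_idx):
--     rows = len(matrix)
--     cols = len(matrix[0]) if matrix else 0
--     if not (0 <= row_idx < rows and 0 <= column_idx < cols):
--         return False
--     if matrix[row_idx][column_idx] != player_idx:
--         return False
--     for dr, dc in ((-1, 0), (0, -1), (-1, -1), (-1, 1)):
--         run = 1
--         r, c = row_idx + dr, column_idx + dc
--         while 0 <= r < rows and 0 <= c < cols and matrix[r][c] == player_idx:
--             run += 1
--             r += dr
--             c += dc
--         r, c = row_idx - dr, column_idx - dc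
--         while 0 <= r < rows and 0 <= c < cols and matrix[r][c] == player_idx:
--             run += 1
--             r -= dr
--             c -= dc
--         if run >= 3:
--             return True
--     return False
-- ===== Notes on version B (the rewrite author's own statement) =====
-- stated objective: faster
-- what changed: B replaces A's recursive flood-search, which deep-copies the whole matrix at every visited cell to mark it, by four constant-space two-pointer walks that count the consecutive run through the cell in each line direction, with one shared bounds/ownership check up front.
-- outside the precondition, e.g. on explore_if_three_connected([['v']], 0, 0, 'v'): A returns False, B returns False; on explore_if_three_connected([['o', 'o'], ['x', 'o'], ['z']], 0, 0, 'o'): A returns False, B returns False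
import Mathlib
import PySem

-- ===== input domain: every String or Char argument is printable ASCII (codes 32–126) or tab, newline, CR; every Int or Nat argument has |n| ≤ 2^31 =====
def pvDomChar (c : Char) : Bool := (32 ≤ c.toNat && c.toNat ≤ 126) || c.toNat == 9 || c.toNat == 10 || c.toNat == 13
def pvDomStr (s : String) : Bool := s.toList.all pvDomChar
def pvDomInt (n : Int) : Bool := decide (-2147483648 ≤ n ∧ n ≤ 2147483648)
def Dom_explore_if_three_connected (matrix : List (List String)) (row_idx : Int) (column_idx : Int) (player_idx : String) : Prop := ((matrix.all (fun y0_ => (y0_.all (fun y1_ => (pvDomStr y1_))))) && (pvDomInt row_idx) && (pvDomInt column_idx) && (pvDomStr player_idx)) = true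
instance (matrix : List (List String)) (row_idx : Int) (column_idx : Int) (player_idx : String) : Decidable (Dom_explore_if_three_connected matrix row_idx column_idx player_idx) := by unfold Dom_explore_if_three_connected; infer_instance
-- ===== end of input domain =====

-- B replaces A's deepcopy-and-mark recursive search by four run-counting walks over the
-- untouched matrix (objective: faster — it makes no matrix copies; equality of results is what is proved).


-- ===== PORT A =====
-- matrix[r][c] / len(matrix[0]); Pre_ guarantees every read Python actually performs is in
-- range, so the getD defaults are never taken (A's bounds test short-circuits before
-- len(matrix[0]) whenever matrix is empty, and B computes `len(matrix[0]) if matrix else 0`)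
def pvCell (m : List (List String)) (r c : Int) : String :=
  PySem.List.pyGetD (PySem.List.pyGetD m r []) c ""
def pvWidth (m : List (List String)) : Int :=
  ((PySem.List.pyGetD m 0 []).length : Int)
def pvMark (m : List (List String)) (r c : Int) : List (List String) :=
  PySem.List.pySetD m r (PySem.List.pySetD (PySem.List.pyGetD m r []) c "v")
-- fuel: totalization device only; on Pre_ inputs A's recursion never exhausts it
def pvFuel (m : List (List String)) : Nat :=
  m.length * (pvWidth m).toNat + m.length + (pvWidth m).toNat + 1

-- search_direction (deepcopy is value semantics in Lean; the dead `result == 3` check is kept)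
def searchDir (fuel : Nat) (m : List (List String)) (r c : Int) (p : String)
    (dr dc : Int) : Int :=
  match fuel with
  | 0 => 0
  | f + 1 =>
    if r < 0 ∨ c < 0 ∨ (m.length : Int) ≤ r ∨ pvWidth m ≤ c then 0
    else if pvCell m r c ≠ p then 0
    else
      let m' := pvMark m r c
      let result : Int := 1
      if result = 3 then result
      else result + searchDir f m' (r + dr) (c + dc) p dr dc
                  + searchDir f m' (r - dr) (c - dc) p dr dc

-- the module-level `directions` dict, in insertion order
def pvDirections : List (String × Int × Int) :=
  [("up", (-1, 0)), ("left", (0, -1)), ("upleft", (-1, -1)), ("upright", (-1, 1))]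

def explore_if_three_connected (matrix : List (List String)) (row_idx : Int) (column_idx : Int) (player_idx : String) : Bool :=
  (pvDirections.foldl
    (fun (st : Bool × Int) dir =>
      let player_won := st.1
      let max_score : Int := 0
      let current_result :=
        searchDir (pvFuel matrix + 1) matrix row_idx column_idx player_idx dir.2.1 dir.2.2
      let max_score := if max_score < current_result then current_result else max_score
      let player_won := if 3 ≤ max_score then true else player_won
      (player_won, max_score))
    (false, 0)).1


-- ===== PORT B =====
-- one `while 0 <= r < rows and 0 <= c < cols and matrix[r][c] == player:` loop of Source B
def walkDir (fuel : Nat) (m : List (List String)) (r c dr dc : Int) (p : String) : Int :=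
  match fuel with
  | 0 => 0
  | f + 1 =>
    if 0 ≤ r ∧ r < (m.length : Int) ∧ 0 ≤ c ∧ c < pvWidth m ∧ pvCell m r c = p
    then 1 + walkDir f m (r + dr) (c + dc) dr dc p
    else 0


def explore_if_three_connected_alt (matrix : List (List String)) (row_idx : Int) (column_idx : Int) (player_idx : String) : Bool :=
  let rows : Int := matrix.length
  let cols : Int := pvWidth matrix
  if ¬(0 ≤ row_idx ∧ row_idx < rows ∧ 0 ≤ column_idx ∧ column_idx < cols) then false
  else if pvCell matrix row_idx column_idx ≠ player_idx then false
  else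
    [((-1 : Int), (0 : Int)), (0, -1), (-1, -1), (-1, 1)].any fun d =>
      let run := 1
        + walkDir (pvFuel matrix) matrix (row_idx + d.1) (column_idx + d.2) d.1 d.2 player_idx
        + walkDir (pvFuel matrix) matrix (row_idx - d.1) (column_idx - d.2) (-d.1) (-d.2) player_idx
      3 ≤ run


-- ===== PRECONDITION & SPEC =====
-- Pre_ excludes: player_idx = "v",
-- which collides with A's visited marker and can make A recurse forever on adjacent "v" cells
-- (where A does return, B agrees); and matrices with a row shorter than row 0 when the search
-- actually starts (A can raise IndexError while walking into such a row; where it does return,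
-- B returns the same value) — a start that is out of bounds or does not hold the player is kept.
def Pre_explore_if_three_connected (matrix : List (List String)) (row_idx : Int) (column_idx : Int) (player_idx : String) : Prop :=
  player_idx ≠ "v" ∧
    ((∀ row ∈ matrix, (matrix.headD []).length ≤ row.length) ∨
     ¬(0 ≤ row_idx ∧ row_idx < (matrix.length : Int) ∧ 0 ≤ column_idx ∧
        column_idx < (((matrix.headD []).length : Nat) : Int)) ∨
     (column_idx.toNat < (matrix.getD row_idx.toNat []).length ∧
        (matrix.getD row_idx.toNat []).getD column_idx.toNat "" ≠ player_idx))
instance (matrix : List (List String)) (row_idx : Int) (column_idx : Int) (player_idx : String) : Decidable (Pre_explore_if_three_connected matrix row_idx column_idx player_idx) := by unfold Pre_explore_if_three_connected; infer_instance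

def pvWitness_explore_if_three_connected : List (List String) × Int × Int × String :=
  ([["x", "x", "x"], ["o", "o", "x"]], 0, 1, "x")

def Spec_explore_if_three_connected (matrix : List (List String)) (row_idx : Int) (column_idx : Int) (player_idx : String) (out : Bool) : Prop := out = explore_if_three_connected_alt matrix row_idx column_idx player_idx
instance (matrix : List (List String)) (row_idx : Int) (column_idx : Int) (player_idx : String) (out : Bool) : Decidable (Spec_explore_if_three_connected matrix row_idx column_idx player_idx out) := by unfold Spec_explore_if_three_connected; infer_instance

-- ===== CLAIM (what is proved, stated in full; the proofs are below) =====
def Claim_equal_explore_if_three_connected : Prop := ∀ (matrix : List (List String)) (row_idx : Int) (column_idx : Int) (player_idx : String), Dom_explore_if_three_connected matrix row_idx column_idx player_idx → Pre_explore_if_three_connected matrix row_idx column_idx player_idx → Spec_explore_if_three_connected matrix row_idx column_idx player_idx (explore_if_three_connected matrix row_idx column_idx player_idx)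

-- ===== LEMMAS AND PROOFS =====
-- every row is at least as long as row 0 (the proof-side reading of Pre_; preserved by marking)
def pvRect (m : List (List String)) : Prop :=
  ∀ row ∈ m, (pvWidth m).toNat ≤ row.length


theorem mark_getElem? (m : List (List String)) (r c : Int) (hr : 0 ≤ r) (i : Nat) :
    (pvMark m r c)[i]? = if i = r.toNat ∧ i < m.length
      then some (PySem.List.pySetD (PySem.List.pyGetD m r []) c "v") else m[i]? := by
  simp only [pvMark, PySem.List.pySetD_of_nonneg _ _ hr, List.getElem?_set]
  split_ifs with h1 h2 h3 h4 <;> simp_all <;> omega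

theorem mark_row_len (m : List (List String)) (r c : Int) (hr : 0 ≤ r) (i : Nat) :
    ((pvMark m r c)[i]?.map List.length) = (m[i]?.map List.length) := by
  rw [mark_getElem? m r c hr i]
  split_ifs with h
  · obtain ⟨h1, h2⟩ := h
    subst h1
    simp only [Option.map_some, PySem.List.length_pySetD]
    rw [PySem.List.pyGetD_of_nonneg _ _ hr]
    simp [List.getElem?_eq_getElem h2]
  · rfl

theorem mark_length (m : List (List String)) (r c : Int) :
    (pvMark m r c).length = m.length := by
  simp [pvMark]

theorem mark_width (m : List (List String)) (r c : Int) (hr : 0 ≤ r) :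
    pvWidth (pvMark m r c) = pvWidth m := by
  have e : ∀ (xs : List (List String)),
      ((PySem.List.pyGetD xs 0 []).length : Int) = ((xs[0]?.map List.length).getD 0 : Nat) := by
    intro xs; cases xs <;> simp [PySem.List.pyGetD_zero]
  simp only [pvWidth]
  rw [e, e, mark_row_len m r c hr 0]

theorem mark_rect (m : List (List String)) (r c : Int) (hr : 0 ≤ r)
    (h : pvRect m) : pvRect (pvMark m r c) := by
  intro row hrow
  rw [mark_width m r c hr]
  obtain ⟨i, hilt, hi⟩ := List.mem_iff_getElem.mp hrow
  have hlen := mark_row_len m r c hr i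
  rw [List.getElem?_eq_getElem hilt, hi] at hlen
  cases hml : m[i]? with
  | none => rw [hml] at hlen; simp at hlen
  | some orow =>
    rw [hml] at hlen; simp at hlen; rw [hlen]
    exact h orow (List.mem_of_getElem? hml)

theorem cell_mark_ne (m : List (List String)) (r c x y : Int)
    (hx : 0 ≤ x) (hy : 0 ≤ y) (hr : 0 ≤ r) (hc : 0 ≤ c)
    (hne : x ≠ r ∨ y ≠ c) :
    pvCell (pvMark m r c) x y = pvCell m x y := by
  simp only [pvCell, PySem.List.pyGetD_of_nonneg _ _ hx, PySem.List.pyGetD_of_nonneg _ _ hy,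
    List.getD_eq_getElem?_getD, mark_getElem? m r c hr]
  by_cases hxr : x = r
  · have hyc : y ≠ c := by tauto
    by_cases hlt : x.toNat = r.toNat ∧ x.toNat < m.length
    · rw [if_pos hlt, Option.getD_some]
      rw [PySem.List.pySetD_of_nonneg _ _ hc, List.getElem?_set]
      have hnc : ¬ c.toNat = y.toNat := by omega
      rw [if_neg hnc, PySem.List.pyGetD_of_nonneg _ _ hr, List.getD_eq_getElem?_getD]
      subst hxr
      rfl
    · rw [if_neg hlt]
  · have hh : ¬ (x.toNat = r.toNat ∧ x.toNat < m.length) := by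
      intro hh; exact hxr (by omega)
    rw [if_neg hh]

theorem cell_mark_self (m : List (List String)) (r c : Int)
    (hr : 0 ≤ r) (hrl : r < (m.length : Int)) (hc : 0 ≤ c) (hcw : c < pvWidth m)
    (hrect : pvRect m) :
    pvCell (pvMark m r c) r c = "v" := by
  have hrn : r.toNat < m.length := by omega
  simp only [pvCell, PySem.List.pyGetD_of_nonneg _ _ hr, PySem.List.pyGetD_of_nonneg _ _ hc,
    List.getD_eq_getElem?_getD, mark_getElem? m r c hr]
  have hcond : True ∧ r.toNat < m.length := ⟨trivial, hrn⟩
  rw [if_pos hcond, Option.getD_some, PySem.List.pySetD_of_nonneg _ _ hc, List.getElem?_set]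
  have hcl : c.toNat < (m[r.toNat]?.getD []).length := by
    rw [List.getElem?_eq_getElem hrn, Option.getD_some]
    have := hrect (m[r.toNat]) (List.getElem_mem hrn)
    omega
  rw [if_pos rfl, if_pos hcl]
  rfl

theorem walk_mark (m : List (List String)) (r c dr dc : Int) (p : String)
    (hr : 0 ≤ r) (hc : 0 ≤ c) :
    ∀ f x y, (∀ k : Nat, ¬(x + k * dr = r ∧ y + k * dc = c)) →
      walkDir f (pvMark m r c) x y dr dc p = walkDir f m x y dr dc p := by
  intro f
  induction f with
  | zero => intro x y h; rfl
  | succ f ih =>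
    intro x y h
    have h0 := h 0
    simp only [Nat.cast_zero, zero_mul, add_zero] at h0
    rw [walkDir, walkDir, mark_length, mark_width m r c hr]
    by_cases hb : 0 ≤ x ∧ x < (m.length : Int) ∧ 0 ≤ y ∧ y < pvWidth m
    · rw [cell_mark_ne m r c x y hb.1 hb.2.2.1 hr hc (by tauto)]
      split_ifs with hcond
      · rw [ih (x + dr) (y + dc) ?_]
        intro k hk
        exact h (k + 1) (by push_cast; constructor <;> [linarith [hk.1]; linarith [hk.2]])
      · rfl
    · rw [if_neg (by tauto), if_neg (by tauto)]

theorem search_blocked (f : Nat) (m : List (List String)) (r c : Int) (p : String)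
    (dr dc : Int)
    (h : ¬(0 ≤ r ∧ r < (m.length : Int) ∧ 0 ≤ c ∧ c < pvWidth m ∧ pvCell m r c = p)) :
    searchDir f m r c p dr dc = 0 := by
  cases f with
  | zero => rfl
  | succ f =>
    rw [searchDir]
    by_cases hb : r < 0 ∨ c < 0 ∨ (m.length : Int) ≤ r ∨ pvWidth m ≤ c
    · rw [if_pos hb]
    · rw [if_neg hb, if_pos (by push Not at hb; tauto)]

theorem search_symm (f : Nat) : ∀ (m : List (List String)) (r c : Int) (p : String)
    (dr dc : Int), searchDir f m r c p (-dr) (-dc) = searchDir f m r c p dr dc := by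
  induction f with
  | zero => intro m r c p dr dc; rfl
  | succ f ih =>
    intro m r c p dr dc
    rw [searchDir, searchDir]
    split_ifs with h1 h2
    · rfl
    · rfl
    · simp only [sub_neg_eq_add, ← sub_eq_add_neg]
      rw [ih, ih]
      rw [if_neg (by decide), if_neg (by decide)]
      ring

theorem ray_shift (dr dc r c x y : Int) (hd : ¬(dr = 0 ∧ dc = 0))
    (hx : x = r + dr) (hy : y = c + dc) :
    ∀ k : Nat, ¬(x + k * dr = r ∧ y + k * dc = c) := by
  intro k hk
  obtain ⟨h1, h2⟩ := hk
  have e1 : ((k : Int) + 1) * dr = 0 := by rw [hx] at h1; ring_nf; ring_nf at h1; linarith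
  have e2 : ((k : Int) + 1) * dc = 0 := by rw [hy] at h2; ring_nf; ring_nf at h2; linarith
  have hk1 : (k : Int) + 1 ≠ 0 := by positivity
  apply hd
  constructor
  · rcases mul_eq_zero.mp e1 with h | h
    · exact absurd h hk1
    · exact h
  · rcases mul_eq_zero.mp e2 with h | h
    · exact absurd h hk1
    · exact h

theorem cond_mark_iff (m : List (List String)) (r c x y : Int) (p : String)
    (hr : 0 ≤ r) (hc : 0 ≤ c) (hne : x ≠ r ∨ y ≠ c) :
    ((0 ≤ x ∧ x < ((pvMark m r c).length : Int) ∧ 0 ≤ y ∧ y < pvWidth (pvMark m r c) ∧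
        pvCell (pvMark m r c) x y = p) ↔
     (0 ≤ x ∧ x < (m.length : Int) ∧ 0 ≤ y ∧ y < pvWidth m ∧ pvCell m x y = p)) := by
  rw [mark_length, mark_width m r c hr]
  constructor
  · rintro ⟨h1, h2, h3, h4, h5⟩
    exact ⟨h1, h2, h3, h4, by rwa [cell_mark_ne m r c x y h1 h3 hr hc hne] at h5⟩
  · rintro ⟨h1, h2, h3, h4, h5⟩
    exact ⟨h1, h2, h3, h4, by rwa [cell_mark_ne m r c x y h1 h3 hr hc hne]⟩

theorem search_eq_walk (p : String) (hp : p ≠ "v") (dr dc : Int)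
    (hd : ¬(dr = 0 ∧ dc = 0)) :
    ∀ f (m : List (List String)) (r c : Int), pvRect m →
      ¬(0 ≤ r - dr ∧ r - dr < (m.length : Int) ∧ 0 ≤ c - dc ∧ c - dc < pvWidth m ∧
          pvCell m (r - dr) (c - dc) = p) →
      searchDir f m r c p dr dc = walkDir f m r c dr dc p := by
  intro f
  induction f with
  | zero => intro m r c _ _; rfl
  | succ f ih =>
    intro m r c hrect hblock
    rw [searchDir, walkDir]
    by_cases hok : 0 ≤ r ∧ r < (m.length : Int) ∧ 0 ≤ c ∧ c < pvWidth m ∧ pvCell m r c = p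
    · obtain ⟨hr0, hrl, hc0, hcw, hcell⟩ := hok
      rw [if_neg (by push Not; omega), if_neg (by simpa using hcell), if_neg (by decide),
        if_pos ⟨hr0, hrl, hc0, hcw, hcell⟩]
      have hne : r - dr ≠ r ∨ c - dc ≠ c := by
        by_contra hcon; push Not at hcon; exact hd ⟨by linarith [hcon.1], by linarith [hcon.2]⟩
      -- backward call is blocked in the marked matrix
      have hb' : ¬(0 ≤ r - dr ∧ r - dr < ((pvMark m r c).length : Int) ∧ 0 ≤ c - dc ∧
          c - dc < pvWidth (pvMark m r c) ∧ pvCell (pvMark m r c) (r - dr) (c - dc) = p) := by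
        rw [cond_mark_iff m r c _ _ p hr0 hc0 hne]; exact hblock
      rw [search_blocked f _ _ _ _ _ _ hb']
      -- forward call: its backward neighbour is the freshly marked start cell
      have hfb : ¬(0 ≤ r + dr - dr ∧ r + dr - dr < ((pvMark m r c).length : Int) ∧
          0 ≤ c + dc - dc ∧ c + dc - dc < pvWidth (pvMark m r c) ∧
          pvCell (pvMark m r c) (r + dr - dr) (c + dc - dc) = p) := by
        intro hcon
        have : pvCell (pvMark m r c) (r + dr - dr) (c + dc - dc) = "v" := by
          rw [show r + dr - dr = r by ring, show c + dc - dc = c by ring]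
          exact cell_mark_self m r c hr0 hrl hc0 hcw hrect
        rw [this] at hcon
        exact hp hcon.2.2.2.2.symm
      rw [ih (pvMark m r c) (r + dr) (c + dc) (mark_rect m r c hr0 hrect) hfb]
      rw [walk_mark m r c dr dc p hr0 hc0 f (r + dr) (c + dc)
        (ray_shift dr dc r c (r + dr) (c + dc) hd rfl rfl)]
      ring
    · have hdisj : (r < 0 ∨ c < 0 ∨ (m.length : Int) ≤ r ∨ pvWidth m ≤ c) ∨ pvCell m r c ≠ p := by
        by_contra hcon; push Not at hcon; exact hok ⟨by omega, by omega, by omega, by omega, hcon.2⟩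
      rw [if_neg hok]
      rcases hdisj with hdj | hcell
      · rw [if_pos hdj]
      · by_cases hdj : r < 0 ∨ c < 0 ∨ (m.length : Int) ≤ r ∨ pvWidth m ≤ c
        · rw [if_pos hdj]
        · rw [if_neg hdj, if_pos (by simpa using hcell)]

theorem search_eq_run (m : List (List String)) (r c : Int) (p : String)
    (dr dc : Int) (hd : ¬(dr = 0 ∧ dc = 0)) (hp : p ≠ "v") (hrect : pvRect m)
    (hr0 : 0 ≤ r) (hrl : r < (m.length : Int)) (hc0 : 0 ≤ c) (hcw : c < pvWidth m)
    (hcell : pvCell m r c = p) (f : Nat) :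
    searchDir (f + 1) m r c p dr dc =
      1 + walkDir f m (r + dr) (c + dc) dr dc p
        + walkDir f m (r - dr) (c - dc) (-dr) (-dc) p := by
  rw [searchDir]
  rw [if_neg (by push Not; omega), if_neg (by simpa using hcell), if_neg (by decide)]
  have hrect' := mark_rect m r c hr0 hrect
  have hself : pvCell (pvMark m r c) r c = "v" := cell_mark_self m r c hr0 hrl hc0 hcw hrect
  have hfb : ¬(0 ≤ r + dr - dr ∧ r + dr - dr < ((pvMark m r c).length : Int) ∧
      0 ≤ c + dc - dc ∧ c + dc - dc < pvWidth (pvMark m r c) ∧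
      pvCell (pvMark m r c) (r + dr - dr) (c + dc - dc) = p) := by
    intro hcon
    rw [show r + dr - dr = r by ring, show c + dc - dc = c by ring, hself] at hcon
    exact hp hcon.2.2.2.2.symm
  rw [search_eq_walk p hp dr dc hd f (pvMark m r c) (r + dr) (c + dc) hrect' hfb]
  rw [walk_mark m r c dr dc p hr0 hc0 f (r + dr) (c + dc)
    (ray_shift dr dc r c (r + dr) (c + dc) hd rfl rfl)]
  have hd' : ¬(-dr = 0 ∧ -dc = 0) := by
    intro h; exact hd ⟨by linarith [h.1], by linarith [h.2]⟩
  rw [← search_symm f (pvMark m r c) (r - dr) (c - dc) p dr dc]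
  have hbb : ¬(0 ≤ r - dr - -dr ∧ r - dr - -dr < ((pvMark m r c).length : Int) ∧
      0 ≤ c - dc - -dc ∧ c - dc - -dc < pvWidth (pvMark m r c) ∧
      pvCell (pvMark m r c) (r - dr - -dr) (c - dc - -dc) = p) := by
    intro hcon
    rw [show r - dr - -dr = r by ring, show c - dc - -dc = c by ring, hself] at hcon
    exact hp hcon.2.2.2.2.symm
  rw [search_eq_walk p hp (-dr) (-dc) hd' f (pvMark m r c) (r - dr) (c - dc) hrect' hbb]
  rw [walk_mark m r c (-dr) (-dc) p hr0 hc0 f (r - dr) (c - dc)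
    (ray_shift (-dr) (-dc) r c (r - dr) (c - dc) hd' (by ring) (by ring))]

theorem pre_rect (m : List (List String)) (h : ∀ row ∈ m, (m.headD []).length ≤ row.length) :
    pvRect m := by
  intro row hrow
  have := h row hrow
  cases m with
  | nil => simp at hrow
  | cons a l => simpa [pvWidth, PySem.List.pyGetD_zero] using this

theorem walk_nonneg (f : Nat) : ∀ (m : List (List String)) (r c dr dc : Int) (p : String),
    0 ≤ walkDir f m r c dr dc p := by
  induction f with
  | zero => intro m r c dr dc p; exact le_refl 0
  | succ f ih =>
    intro m r c dr dc p
    rw [walkDir]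
    split_ifs
    · have := ih m (r + dr) (c + dc) dr dc p; omega
    · exact le_refl 0

theorem main_thm (matrix : List (List String)) (r c : Int) (p : String)
    (hsafe : (0 ≤ r ∧ r < (matrix.length : Int) ∧ 0 ≤ c ∧ c < pvWidth matrix ∧
        pvCell matrix r c = p) → pvRect matrix) (hp : p ≠ "v") :
    explore_if_three_connected matrix r c p = explore_if_three_connected_alt matrix r c p := by
  by_cases hok : 0 ≤ r ∧ r < (matrix.length : Int) ∧ 0 ≤ c ∧ c < pvWidth matrix ∧
      pvCell matrix r c = p
  · have hrect := hsafe hok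
    obtain ⟨h1, h2, h3, h4, h5⟩ := hok
    rw [explore_if_three_connected, explore_if_three_connected_alt]
    simp only [pvDirections, List.foldl, List.any]
    rw [search_eq_run matrix r c p (-1) 0 (by omega) hp hrect h1 h2 h3 h4 h5,
        search_eq_run matrix r c p 0 (-1) (by omega) hp hrect h1 h2 h3 h4 h5,
        search_eq_run matrix r c p (-1) (-1) (by omega) hp hrect h1 h2 h3 h4 h5,
        search_eq_run matrix r c p (-1) 1 (by omega) hp hrect h1 h2 h3 h4 h5]
    rw [if_neg (not_not_intro ⟨h1, h2, h3, h4⟩), if_neg (not_not_intro h5)]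
    have key : ∀ x y dx dy x2 y2 dx2 dy2 : Int, (0 : Int) <
        1 + walkDir (pvFuel matrix) matrix x y dx dy p
          + walkDir (pvFuel matrix) matrix x2 y2 dx2 dy2 p := by
      intro x y dx dy x2 y2 dx2 dy2
      have := walk_nonneg (pvFuel matrix) matrix x y dx dy p
      have := walk_nonneg (pvFuel matrix) matrix x2 y2 dx2 dy2 p
      omega
    rw [if_pos (key _ _ _ _ _ _ _ _), if_pos (key _ _ _ _ _ _ _ _),
        if_pos (key _ _ _ _ _ _ _ _), if_pos (key _ _ _ _ _ _ _ _)]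
    have iteor : ∀ (v : Int) (b : Bool), (if 3 ≤ v then true else b) = (decide (3 ≤ v) || b) := by
      intro v b; split_ifs with h <;> simp [h]
    rw [iteor, iteor, iteor, iteor]
    simp only [Bool.or_false]
    simp [Bool.or_comm, Bool.or_left_comm, Bool.or_assoc]
  · rw [explore_if_three_connected, explore_if_three_connected_alt]
    simp only [pvDirections, List.foldl]
    rw [search_blocked _ _ _ _ _ _ _ hok, search_blocked _ _ _ _ _ _ _ hok,
        search_blocked _ _ _ _ _ _ _ hok, search_blocked _ _ _ _ _ _ _ hok]
    by_cases hb : 0 ≤ r ∧ r < (matrix.length : Int) ∧ 0 ≤ c ∧ c < pvWidth matrix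
    · have hcell : pvCell matrix r c ≠ p := by tauto
      rw [if_neg (not_not_intro ⟨hb.1, hb.2.1, hb.2.2.1, hb.2.2.2⟩), if_pos hcell]
      decide
    · rw [if_pos (show ¬(0 ≤ r ∧ r < (matrix.length : Int) ∧ 0 ≤ c ∧ c < pvWidth matrix) from hb)]
      decide

-- ===== VERDICT (by name: the statement is the Claim_ definition above) =====
theorem explore_if_three_connected_spec : Claim_equal_explore_if_three_connected := by
  intro matrix row_idx column_idx player_idx _hdom hpre
  obtain ⟨hp, hdisj⟩ := hpre
  have hwidth : pvWidth matrix = (((matrix.headD []).length : Nat) : Int) := by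
    cases matrix with
    | nil => rfl
    | cons a l => simp [pvWidth, PySem.List.pyGetD_zero]
  have hsafe : (0 ≤ row_idx ∧ row_idx < (matrix.length : Int) ∧ 0 ≤ column_idx ∧
      column_idx < pvWidth matrix ∧ pvCell matrix row_idx column_idx = player_idx) →
      pvRect matrix := by
    intro hok
    obtain ⟨h1, h2, h3, h4, h5⟩ := hok
    rcases hdisj with hrect | hnb | hcne
    · exact pre_rect matrix hrect
    · exact absurd ⟨h1, h2, h3, by rw [← hwidth]; exact h4⟩ hnb
    · exfalso
      apply hcne.2
      rw [pvCell, PySem.List.pyGetD_of_nonneg _ _ h3, PySem.List.pyGetD_of_nonneg _ _ h1] at h5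
      exact h5
  unfold Spec_explore_if_three_connected
  exact main_thm matrix row_idx column_idx player_idx hsafe hp
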